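-- pv_equiv track=rewrite | github.com/slothitude/geometric-cognition | experiments/018_factor_ratios/perfect_sieve2.py | is_semiperfect
-- ===== SOURCE A (Python) =====
-- from math import gcd, isqrt, log, exp
--
-- def proper_divisors(n):
--     divs = set()
--     for i in range(1, isqrt(n) + 1):
--         if n % i == 0:
--             divs.add(i)
--             divs.add(n // i)
--     divs.discard(n)
--     return sorted(divs)
--
-- def is_semiperfect(n):
--     """Check if n = sum of some proper divisors (bitset subset-sum)."""
--     divs = proper_divisors(n)
--     if sum(divs) < n:
--         return False
--     reachable = 1
--     for d in divs:
--         reachable |= reachable << d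
--         if reachable.bit_length() > n + 1:
--             reachable &= (1 << (n + 1)) - 1
--     return (reachable >> n) & 1 == 1
-- ===== SOURCE B (Python) =====
-- from math import isqrt
--
--
-- def proper_divisors(n):
--     divs = set()
--     for i in range(1, isqrt(n) + 1):
--         if n % i == 0:
--             divs.add(i)
--             divs.add(n // i)
--     divs.discard(n)
--     return sorted(divs)
--
--
-- def _search(divs, t, rem):
--     """Backtracking: does some subset of divs sum to t?  rem == sum(divs)."""
--     if t == 0:
--         return True
--     if rem < t:
--         return False
--     d = divs[0]
--     rest = divs[1:]
--     if d <= t and _search(rest, t - d, rem - d):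
--         return True
--     return _search(rest, t, rem - d)
--
--
-- def is_semiperfect(n):
--     """Check if n = sum of some proper divisors (pruned backtracking search)."""
--     divs = proper_divisors(n)
--     rem = sum(divs)
--     if rem < n:
--         return False
--     return _search(list(reversed(divs)), n, rem)
-- ===== Notes on version B (the rewrite author's own statement) =====
-- stated objective: alternative
-- what changed: Replaces the bottom-up bitset subset-sum DP (reachable |= reachable << d over an n-bit integer) by a top-down pruned backtracking search over the divisors, largest first, with remaining-sum pruning, so no n-bit bitsets are ever built.
import Mathlib
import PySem

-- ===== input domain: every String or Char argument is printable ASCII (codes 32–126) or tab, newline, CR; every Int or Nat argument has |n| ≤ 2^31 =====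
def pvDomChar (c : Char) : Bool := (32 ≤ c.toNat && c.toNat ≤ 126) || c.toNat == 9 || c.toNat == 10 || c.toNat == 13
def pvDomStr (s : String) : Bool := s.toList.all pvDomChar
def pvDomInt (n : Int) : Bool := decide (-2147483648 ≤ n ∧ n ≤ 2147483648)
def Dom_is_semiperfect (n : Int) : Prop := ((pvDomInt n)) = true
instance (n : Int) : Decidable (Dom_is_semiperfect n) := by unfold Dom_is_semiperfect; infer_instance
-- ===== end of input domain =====

-- B replaces A's word-parallel big-integer bitset subset-sum DP by a pruned backtracking
-- search over the divisors, largest first, with remaining-sum pruning; an alternative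
-- algorithm that never materialises n-bit integers (no speed claim verified).

-- ===== PORT A =====

-- math.isqrt(n): exact for nonnegative n (Python raises ValueError on negatives, excluded by Pre_).
def pvIsqrt (n : Int) : Int := Int.ofNat (Nat.sqrt n.toNat)

def proper_divisors (n : Int) : List Int :=
  let divs : PySem.Set Int :=
    (PySem.List.pyRange 1 (pvIsqrt n + 1) 1).foldl
      (fun s i =>
        if PySem.Int.mod n i = 0 then
          PySem.Set.add (PySem.Set.add s i) (PySem.Int.floordiv n i)
        else s)
      PySem.Set.empty
  PySem.List.sorted (PySem.Set.discard divs n) (fun x => x) false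

-- loop body of A: reachable |= reachable << d, then truncate above bit n+1 (d ≥ 0 under Pre_).
-- Python's test "r'.bit_length() > n + 1" is ported as the equivalent comparison
-- "1 << (n + 1) ≤ r'" (exact here: r' ≥ 1 always, and bit_length(r') > m ⟺ r' ≥ 2^m),
-- because the recursive PySem.Int.bitLength is not stack-safe to evaluate on huge bitsets
-- (shifts are written as core's stack-safe Int.shiftLeft/shiftRight : Int → Nat → Int).
def pvStepA (n r d : Int) : Int :=
  let r' := PySem.Int.bor r (Int.shiftLeft r d.toNat)
  if (Int.shiftLeft 1 ((n + 1).toNat) ≤ r') then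
    PySem.Int.band r' (Int.shiftLeft 1 ((n + 1).toNat) - 1)
  else r'

def is_semiperfect (n : Int) : Bool :=
  let divs := proper_divisors n
  if divs.sum < n then false
  else
    let reachable : Int := divs.foldl (pvStepA n) 1
    PySem.Int.band (Int.shiftRight reachable n.toNat) 1 == 1

-- ===== PORT B =====

-- _search(divs, t, rem): backtracking; rem == sum(divs) at every call from is_semiperfect_alt.
-- The [] branch returns false where Python's divs[0] would raise IndexError; that branch is
-- unreachable from is_semiperfect_alt (when rem = sum [] = 0 and t ≠ 0, a prior test fires).
def pvSearch : List Int → Int → Int → Bool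
  | l, t, rem =>
    if t = 0 then true
    else if rem < t then false
    else
      match l with
      | [] => false
      | d :: rest =>
          (decide (d ≤ t) && pvSearch rest (t - d) (rem - d)) || pvSearch rest t (rem - d)

def is_semiperfect_alt (n : Int) : Bool :=
  let divs := proper_divisors n
  let rem := divs.sum
  if rem < n then false
  else pvSearch divs.reverse n rem

-- ===== PRECONDITION & SPEC =====
-- A raises ValueError (math.isqrt of a negative) exactly on negative n; Pre_ admits everything else.
def Pre_is_semiperfect (n : Int) : Prop := 0 ≤ n
instance (n : Int) : Decidable (Pre_is_semiperfect n) := by unfold Pre_is_semiperfect; infer_instance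
def pvWitness_is_semiperfect : Int := (6)

def Spec_is_semiperfect (n : Int) (out : Bool) : Prop := out = is_semiperfect_alt n
instance (n : Int) (out : Bool) : Decidable (Spec_is_semiperfect n out) := by unfold Spec_is_semiperfect; infer_instance

-- ===== CLAIM (what is proved, stated in full; the proofs are below) =====
def Claim_equal_is_semiperfect : Prop := ∀ (n : Int), Dom_is_semiperfect n → Pre_is_semiperfect n → Spec_is_semiperfect n (is_semiperfect n)

-- ===== LEMMAS AND PROOFS =====

-- subset-sum existence, processing the list left to right (common spec of both ports)
def pvCan : List Int → Int → Bool
  | [], t => decide (t = 0)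
  | d :: r, t => pvCan r t || (decide (d ≤ t) && pvCan r (t - d))

-- every element of the divisor set is an i from the range or n // i
lemma mem_divfold (n x : Int) : ∀ (l : List Int) (s : PySem.Set Int),
    x ∈ l.foldl (fun s i =>
        if PySem.Int.mod n i = 0 then
          PySem.Set.add (PySem.Set.add s i) (PySem.Int.floordiv n i)
        else s) s →
    x ∈ s ∨ ∃ i ∈ l, x = i ∨ x = PySem.Int.floordiv n i := by
  intro l
  induction l with
  | nil => intro s h; exact Or.inl h
  | cons i t ih =>
    intro s h
    rcases ih _ h with h' | ⟨j, hj, hx⟩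
    · by_cases hm : PySem.Int.mod n i = 0
      · simp only [hm, if_pos] at h'
        rcases (PySem.Set.mem_add _ _ _).1 h' with h'' | h''
        · rcases (PySem.Set.mem_add _ _ _).1 h'' with h3 | h3
          · exact Or.inl h3
          · exact Or.inr ⟨i, by simp, Or.inl h3⟩
        · exact Or.inr ⟨i, by simp, Or.inr h''⟩
      · simp only [hm, if_false] at h'
        exact Or.inl (by simpa using h')
    · exact Or.inr ⟨j, by simp [hj], hx⟩

-- every proper divisor is nonnegative (for 0 ≤ n)
lemma proper_divisors_nonneg (n : Int) (hn : 0 ≤ n) : ∀ d ∈ proper_divisors n, 0 ≤ d := by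
  intro d hd
  unfold proper_divisors at hd
  rw [PySem.List.mem_sorted] at hd
  have hd' := (PySem.Set.mem_discard _ _ _).1 hd
  rcases mem_divfold n d _ _ hd'.1 with h | ⟨i, hi, hx⟩
  · simp [PySem.Set.empty] at h
  · have hi1 : 1 ≤ i := ((PySem.List.mem_pyRange_one).1 hi).1
    rcases hx with rfl | rfl
    · omega
    · rw [PySem.Int.floordiv_eq_ediv_of_pos (by omega)]
      exact Int.ediv_nonneg hn (by omega)

-- one A-step on a nonnegative bitset is a Nat bitset whose bits up to n match the or/shift
lemma stepA_cast (n d : Int) (R : Nat) (hn : 0 ≤ n) :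
    ∃ R₂ : Nat, pvStepA n (R : Int) d = (R₂ : Int) ∧
      ∀ k : Nat, k ≤ n.toNat → R₂.testBit k = (R ||| (R <<< d.toNat)).testBit k := by
  unfold pvStepA
  have hc1 : PySem.Int.bor (R : Int) (Int.shiftLeft (R : Int) d.toNat)
      = ((R ||| (R <<< d.toNat) : Nat) : Int) := by
    rw [show Int.shiftLeft (R : Int) d.toNat = ((R <<< d.toNat : Nat) : Int) from rfl]
    exact_mod_cast PySem.Int.bor_natCast R (R <<< d.toNat)
  have h1 : Int.shiftLeft 1 ((n + 1).toNat) = ((2 ^ ((n + 1).toNat) : Nat) : Int) := by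
    rw [show Int.shiftLeft (1 : Int) ((n + 1).toNat) = ((1 <<< ((n + 1).toNat) : Nat) : Int) from rfl,
      Nat.one_shiftLeft]
  rw [hc1, h1]
  by_cases hbl : (((2 ^ ((n + 1).toNat) : Nat) : Int) ≤ ((R ||| (R <<< d.toNat) : Nat) : Int))
  · refine ⟨(R ||| (R <<< d.toNat)) &&& (2 ^ ((n + 1).toNat) - 1), ?_, ?_⟩
    · simp only [hbl, if_pos]
      have h2 : ((2 ^ ((n + 1).toNat) : Nat) : Int) - 1 = ((2 ^ ((n + 1).toNat) - 1 : Nat) : Int) := by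
        have : 1 ≤ 2 ^ ((n + 1).toNat) := Nat.one_le_two_pow
        omega
      rw [h2]
      exact_mod_cast PySem.Int.band_natCast (R ||| (R <<< d.toNat)) (2 ^ ((n + 1).toNat) - 1)
    · intro k hk
      rw [Nat.testBit_and, Nat.testBit_two_pow_sub_one]
      simp [show k < (n + 1).toNat from by omega]
  · exact ⟨R ||| (R <<< d.toNat), by simp only [hbl, if_false], fun _ _ => rfl⟩

-- A's fold computes, in bit k ≤ n, subset-sum reachability of k from some seed bit
lemma foldA_can (n : Int) (hn : 0 ≤ n) :
    ∀ (l : List Int), (∀ d ∈ l, 0 ≤ d) → ∀ (R : Nat),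
    ∃ R' : Nat, l.foldl (pvStepA n) (R : Int) = (R' : Int) ∧
      ∀ k : Nat, k ≤ n.toNat →
        (R'.testBit k = true ↔ ∃ j : Nat, j ≤ k ∧ R.testBit j = true ∧ pvCan l ((k : Int) - j) = true) := by
  intro l
  induction l with
  | nil =>
    intro _ R
    refine ⟨R, rfl, fun k _ => ?_⟩
    constructor
    · intro h; exact ⟨k, le_refl _, h, by simp [pvCan]⟩
    · rintro ⟨j, hj, hb, hc⟩
      simp only [pvCan, decide_eq_true_eq] at hc
      have : j = k := by omega
      subst this; exact hb
  | cons d r ih =>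
    intro hnn R
    have hd0 : 0 ≤ d := hnn d (by simp)
    obtain ⟨R₂, hcast, hbits⟩ := stepA_cast n d R hn
    obtain ⟨R', hfold, hR'⟩ := ih (fun x hx => hnn x (by simp [hx])) R₂
    refine ⟨R', by rw [List.foldl_cons, hcast]; exact hfold, fun k hk => ?_⟩
    rw [hR' k hk]
    constructor
    · rintro ⟨j, hj, hb, hc⟩
      rw [hbits j (by omega), Nat.testBit_or, Nat.testBit_shiftLeft] at hb
      rcases Bool.or_eq_true_iff.1 hb with hb | hb
      · exact ⟨j, hj, hb, by simp only [pvCan]; exact Bool.or_eq_true_iff.2 (Or.inl hc)⟩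
      · rcases Bool.and_eq_true_iff.1 hb with ⟨hdle, hb'⟩
        have hdle' : d.toNat ≤ j := by simpa using hdle
        refine ⟨j - d.toNat, by omega, hb', ?_⟩
        simp only [pvCan]
        refine Bool.or_eq_true_iff.2 (Or.inr (Bool.and_eq_true_iff.2 ⟨?_, ?_⟩))
        · have : ((j - d.toNat : Nat) : Int) = (j : Int) - d := by omega
          rw [this]
          refine decide_eq_true_iff.2 ?_
          omega
        · have : (k : Int) - ((j - d.toNat : Nat) : Int) - d = (k : Int) - j := by omega
          rwa [this]
    · rintro ⟨j, hj, hb, hc⟩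
      simp only [pvCan] at hc
      rcases Bool.or_eq_true_iff.1 hc with hc | hc
      · refine ⟨j, hj, ?_, hc⟩
        rw [hbits j (by omega), Nat.testBit_or]
        exact Bool.or_eq_true_iff.2 (Or.inl hb)
      · rcases Bool.and_eq_true_iff.1 hc with ⟨hdle, hc'⟩
        have hdle' : d ≤ (k : Int) - j := by simpa using hdle
        refine ⟨j + d.toNat, by omega, ?_, ?_⟩
        · rw [hbits (j + d.toNat) (by omega), Nat.testBit_or, Nat.testBit_shiftLeft]
          refine Bool.or_eq_true_iff.2 (Or.inr (Bool.and_eq_true_iff.2 ⟨by simp, ?_⟩))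
          simpa using hb
        · have : (k : Int) - ((j + d.toNat : Nat) : Int) = (k : Int) - j - d := by omega
          rwa [this]

-- the result bit of A, read off as a Nat testBit
lemma final_bit (n : Int) (R' : Nat) :
    (PySem.Int.band (Int.shiftRight (R' : Int) n.toNat) 1 == 1) = R'.testBit n.toNat := by
  rw [show Int.shiftRight ((R' : Nat) : Int) n.toNat = ((R' >>> n.toNat : Nat) : Int) from rfl]
  have hb : PySem.Int.band ((R' >>> n.toNat : Nat) : Int) 1 = (((R' >>> n.toNat) &&& 1 : Nat) : Int) := by
    exact_mod_cast PySem.Int.band_natCast (R' >>> n.toNat) 1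
  rw [hb]
  have ht : (R'.testBit n.toNat) = ((R' >>> n.toNat) &&& 1 == 1) := by
    simp [Nat.testBit, Nat.and_one_is_mod, Nat.shiftRight_eq_div_pow]
  rw [ht]
  have hcast2 : ∀ m : Nat, (((m : Nat) : Int) == (1 : Int)) = (m == 1) := by
    intro m; by_cases hm1 : m = 1 <;> simp [hm1]
  rw [hcast2]

-- the empty subset always sums to 0
lemma pvCan_zero : ∀ l : List Int, pvCan l 0 = true := by
  intro l
  induction l with
  | nil => simp [pvCan]
  | cons d r ih => simp [pvCan, ih]

-- a reachable sum never exceeds the total (for nonnegative entries)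
lemma pvCan_le_sum : ∀ l : List Int, (∀ d ∈ l, 0 ≤ d) → ∀ t, pvCan l t = true → t ≤ l.sum := by
  intro l
  induction l with
  | nil => intro _ t h; simp only [pvCan, decide_eq_true_eq] at h; simp [h]
  | cons d r ih =>
    intro hnn t h
    have hd0 : 0 ≤ d := hnn d (by simp)
    have hr := ih (fun x hx => hnn x (by simp [hx]))
    simp only [pvCan] at h
    rcases Bool.or_eq_true_iff.1 h with h | h
    · have := hr t h
      simp only [List.sum_cons]; omega
    · rcases Bool.and_eq_true_iff.1 h with ⟨_, h'⟩
      have := hr (t - d) h'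
      simp only [List.sum_cons]; omega

-- appending one nonnegative element on the right
lemma pvCan_append (d : Int) (hd : 0 ≤ d) :
    ∀ l : List Int, (∀ x ∈ l, 0 ≤ x) → ∀ t,
      pvCan (l ++ [d]) t = (pvCan l t || (decide (d ≤ t) && pvCan l (t - d))) := by
  intro l
  induction l with
  | nil => intro _ t; simp [pvCan]
  | cons x r ih =>
    intro hnn t
    have hx0 : 0 ≤ x := hnn x (by simp)
    have hr := ih (fun y hy => hnn y (by simp [hy]))
    have hstep : pvCan (x :: r ++ [d]) t
        = (pvCan (r ++ [d]) t || (decide (x ≤ t) && pvCan (r ++ [d]) (t - x))) := rfl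
    rw [hstep, hr t, hr (t - x)]
    simp only [pvCan]
    rw [Bool.eq_iff_iff]
    simp only [Bool.or_eq_true, Bool.and_eq_true, decide_eq_true_eq]
    constructor
    · rintro ((h | ⟨hdt, h⟩) | ⟨hxt, (h | ⟨hdtx, h⟩)⟩)
      · exact Or.inl (Or.inl h)
      · exact Or.inr ⟨hdt, Or.inl h⟩
      · exact Or.inl (Or.inr ⟨hxt, h⟩)
      · refine Or.inr ⟨by omega, Or.inr ⟨by omega, ?_⟩⟩
        rwa [show t - d - x = t - x - d by ring]
    · rintro ((h | ⟨hxt, h⟩) | ⟨hdt, (h | ⟨hxtd, h⟩)⟩)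
      · exact Or.inl (Or.inl h)
      · exact Or.inr ⟨hxt, Or.inl h⟩
      · exact Or.inl (Or.inr ⟨hdt, h⟩)
      · refine Or.inr ⟨by omega, Or.inr ⟨by omega, ?_⟩⟩
        rwa [show t - x - d = t - d - x by ring]

-- reachability does not depend on the processing order (reversal)
lemma pvCan_reverse : ∀ l : List Int, (∀ x ∈ l, 0 ≤ x) → ∀ t, pvCan l.reverse t = pvCan l t := by
  intro l
  induction l with
  | nil => intro _ t; rfl
  | cons d r ih =>
    intro hnn t
    have hd0 : 0 ≤ d := hnn d (by simp)
    have hr : ∀ x ∈ r.reverse, 0 ≤ x := by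
      intro x hx; exact hnn x (by simp at hx; simp [hx])
    rw [List.reverse_cons, pvCan_append d hd0 r.reverse hr t,
      ih (fun x hx => hnn x (by simp [hx])) t,
      ih (fun x hx => hnn x (by simp [hx])) (t - d)]
    rfl

-- the pruned backtracking search, run with rem = sum, computes reachability
lemma pvSearch_eq_can : ∀ l : List Int, (∀ d ∈ l, 0 ≤ d) → ∀ t, pvSearch l t l.sum = pvCan l t := by
  intro l
  induction l with
  | nil =>
    intro _ t
    unfold pvSearch
    by_cases ht : t = 0
    · simp [ht, pvCan]
    · by_cases hlt : (0 : Int) < t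
      · simp [ht, List.sum_nil, hlt, pvCan]
      · simp [ht, List.sum_nil, hlt, pvCan]
  | cons d r ih =>
    intro hnn t
    have hd0 : 0 ≤ d := hnn d (by simp)
    have hr := ih (fun x hx => hnn x (by simp [hx]))
    unfold pvSearch
    by_cases ht : t = 0
    · simp [ht, pvCan_zero]
    · rw [if_neg ht]
      by_cases hlt : (d :: r).sum < t
      · rw [if_pos hlt]
        symm
        by_contra h
        have := pvCan_le_sum (d :: r) hnn t (by simpa using h)
        omega
      · rw [if_neg hlt]
        have hmatch : (match d :: r with
            | [] => false
            | d :: rest => (decide (d ≤ t) && pvSearch rest (t - d) ((d :: r).sum - d))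
                || pvSearch rest t ((d :: r).sum - d))
            = ((decide (d ≤ t) && pvSearch r (t - d) ((d :: r).sum - d))
                || pvSearch r t ((d :: r).sum - d)) := rfl
        rw [hmatch, show (d :: r).sum - d = r.sum by simp [List.sum_cons], hr (t - d), hr t]
        simp only [pvCan]
        rw [Bool.or_comm]

-- ===== VERDICT (by name: the statement is the Claim_ definition above) =====
theorem is_semiperfect_spec : Claim_equal_is_semiperfect := by
  intro n _ hpre
  have hn : (0 : Int) ≤ n := hpre
  unfold Spec_is_semiperfect is_semiperfect is_semiperfect_alt
  simp only []
  by_cases hsum : (proper_divisors n).sum < n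
  · simp [hsum]
  · simp only [hsum, if_false]
    have hnn := proper_divisors_nonneg n hn
    obtain ⟨R', hA, hbits⟩ := foldA_can n hn (proper_divisors n) hnn 1
    have h1 : ((1 : Nat) : Int) = (1 : Int) := by norm_num
    rw [h1] at hA
    rw [hA, final_bit n R']
    have hnrev : ∀ x ∈ (proper_divisors n).reverse, 0 ≤ x := by
      intro x hx; exact hnn x (by simpa using hx)
    rw [show (proper_divisors n).sum = (proper_divisors n).reverse.sum by simp,
      pvSearch_eq_can (proper_divisors n).reverse hnrev n,
      pvCan_reverse (proper_divisors n) hnn n]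
    rw [Bool.eq_iff_iff, hbits n.toNat (le_refl _)]
    constructor
    · rintro ⟨j, hj, hb, hc⟩
      have hj0 : j = 0 := by
        rw [show (1 : Nat) = 2 ^ 0 from rfl, Nat.testBit_two_pow] at hb
        exact (decide_eq_true_iff.1 hb).symm
      subst hj0
      rwa [show (n.toNat : Int) - ((0 : Nat) : Int) = n by omega] at hc
    · intro hc
      refine ⟨0, Nat.zero_le _, by simp, ?_⟩
      rwa [show (n.toNat : Int) - ((0 : Nat) : Int) = n by omega]
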